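-- pv_equiv track=rewrite | github.com/webb-e/S2_Landsat_Comparison | dissolve_explode_lakes.py | generate_combinations_with_prefix
-- ===== SOURCE A (Python) =====
-- import itertools
-- import string
-- import itertools
-- import string
--
-- def generate_combinations_with_prefix(prefix, length, count):
--     characters = string.ascii_letters + string.digits
--     combinations_with_prefix = []
--
--     for comb in itertools.product(characters, repeat=length):
--         if len(combinations_with_prefix) >= count:
--             break
--         combinations_with_prefix.append(prefix + ''.join(comb))
--
--     return combinations_with_prefix
-- ===== SOURCE B (Python) =====
-- import string
--
-- def generate_combinations_with_prefix(prefix, length, count):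
--     characters = string.ascii_letters + string.digits
--     n = min(count, 62 ** length)
--     result = []
--     for i in range(n):
--         digits = []
--         x = i
--         for _ in range(length):
--             digits.append(characters[x % 62])
--             x //= 62
--         result.append(prefix + ''.join(reversed(digits)))
--     return result
-- ===== Notes on version B (the rewrite author's own statement) =====
-- stated objective: alternative
-- what changed: B computes the i-th product element directly by decoding i into base-62 digits over ascii_letters+digits (count capped at 62**length), instead of enumerating itertools.product tuples and breaking at count.
import Mathlib
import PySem

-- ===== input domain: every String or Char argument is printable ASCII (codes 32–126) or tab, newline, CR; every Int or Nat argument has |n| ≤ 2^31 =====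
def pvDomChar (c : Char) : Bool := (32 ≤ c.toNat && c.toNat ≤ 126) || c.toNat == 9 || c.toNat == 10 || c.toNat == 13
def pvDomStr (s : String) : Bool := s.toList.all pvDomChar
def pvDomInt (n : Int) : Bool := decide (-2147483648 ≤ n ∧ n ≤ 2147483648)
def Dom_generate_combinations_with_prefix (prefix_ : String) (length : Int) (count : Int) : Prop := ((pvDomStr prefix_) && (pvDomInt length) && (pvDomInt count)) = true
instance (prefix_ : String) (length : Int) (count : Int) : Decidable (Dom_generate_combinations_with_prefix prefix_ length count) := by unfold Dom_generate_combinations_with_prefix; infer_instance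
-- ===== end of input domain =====

-- B replaces A's itertools.product enumeration (advance a tuple, append until count) by direct
-- base-62 decoding of each index i < min(count, 62^length) into its suffix string (objective: alternative).

-- ===== PORT A =====
-- string.ascii_letters + string.digits
def pvChars : List Char := "abcdefghijklmnopqrstuvwxyzABCDEFGHIJKLMNOPQRSTUVWXYZ0123456789".toList

-- itertools.product(characters, repeat=length) is ported by hand as an odometer over the REVERSED
-- index tuple (least-significant position first): product advances the last position fastest, so one
-- step of the iterator = this increment-with-carry; none = iterator exhausted. Exact on length ≥ 0.
def pvIncRev : List Nat → Option (List Nat)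
  | [] => none
  | d :: rest =>
    if d + 1 < 62 then some ((d + 1) :: rest)
    else (pvIncRev rest).map (fun r => 0 :: r)

-- A's loop body: if len(acc) >= count: break; acc.append(prefix + ''.join(comb)); next tuple.
-- 'remaining' = count - len(acc), so the break is the 0 case.
def pvLoopA (prefix_ : String) : Nat → List Nat → List String → List String
  | 0, _, acc => acc
  | r + 1, dsRev, acc =>
    let s := prefix_ ++ String.ofList (dsRev.reverse.map (fun d => pvChars.getD d 'a'))
    let acc' := acc ++ [s]
    match pvIncRev dsRev with
    | none => acc'
    | some ds' => pvLoopA prefix_ r ds' acc'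

def generate_combinations_with_prefix (prefix_ : String) (length : Int) (count : Int) : List String :=
  pvLoopA prefix_ count.toNat (List.replicate length.toNat 0) []

-- ===== PORT B =====
-- Source B's inner loop: append characters[x % 62]; x //= 62, repeated `length` times (x stays ≥ 0);
-- the digits list is least-significant first, reversed on join.
def pvDigits : Nat → Nat → List Char
  | _, 0 => []
  | x, l + 1 => pvChars.getD (x % 62) 'a' :: pvDigits (x / 62) l

def generate_combinations_with_prefix_alt (prefix_ : String) (length : Int) (count : Int) : List String :=
  (List.range (min count ((62 : Int) ^ length.toNat)).toNat).map (fun i => prefix_ ++ String.ofList (pvDigits i length.toNat).reverse)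

-- ===== PRECONDITION & SPEC =====
-- Pre_ excludes length < 0, where Python A raises ValueError (itertools.product with repeat < 0).
def Pre_generate_combinations_with_prefix (prefix_ : String) (length : Int) (count : Int) : Prop := 0 ≤ length
instance (prefix_ : String) (length : Int) (count : Int) : Decidable (Pre_generate_combinations_with_prefix prefix_ length count) := by unfold Pre_generate_combinations_with_prefix; infer_instance
def pvWitness_generate_combinations_with_prefix : String × Int × Int := ("x", 2, 5)

def Spec_generate_combinations_with_prefix (prefix_ : String) (length : Int) (count : Int) (out : List String) : Prop := out = generate_combinations_with_prefix_alt prefix_ length count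
instance (prefix_ : String) (length : Int) (count : Int) (out : List String) : Decidable (Spec_generate_combinations_with_prefix prefix_ length count out) := by unfold Spec_generate_combinations_with_prefix; infer_instance

-- ===== CLAIM (what is proved, stated in full; the proofs are below) =====
def Claim_equal_generate_combinations_with_prefix : Prop := ∀ (prefix_ : String) (length : Int) (count : Int), Dom_generate_combinations_with_prefix prefix_ length count → Pre_generate_combinations_with_prefix prefix_ length count → Spec_generate_combinations_with_prefix prefix_ length count (generate_combinations_with_prefix prefix_ length count)

-- ===== LEMMAS AND PROOFS =====

-- the base-62 digits of v, least-significant first, as Nat indices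
def pvIdigits : Nat → Nat → List Nat
  | _, 0 => []
  | v, l + 1 => v % 62 :: pvIdigits (v / 62) l

theorem pvDigits_eq_map : ∀ (l x : Nat), pvDigits x l = (pvIdigits x l).map (fun d => pvChars.getD d 'a') := by
  intro l
  induction l with
  | zero => intro x; simp [pvDigits, pvIdigits]
  | succ l ih => intro x; simp [pvDigits, pvIdigits, ih]

theorem pvIdigits_zero : ∀ (l : Nat), pvIdigits 0 l = List.replicate l 0 := by
  intro l
  induction l with
  | zero => simp [pvIdigits]
  | succ l ih => simp [pvIdigits, ih, List.replicate]

theorem pvIncRev_idigits : ∀ (l v : Nat), v < 62 ^ l →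
    pvIncRev (pvIdigits v l) = if v + 1 < 62 ^ l then some (pvIdigits (v + 1) l) else none := by
  intro l
  induction l with
  | zero =>
    intro v hv
    simp [pow_zero] at hv ⊢
    subst hv
    simp [pvIdigits, pvIncRev]
  | succ l ih =>
    intro v hv
    have h62 : 0 < 62 := by norm_num
    have hdiv : v / 62 < 62 ^ l := by
      rw [Nat.div_lt_iff_lt_mul h62]
      calc v < 62 ^ (l + 1) := hv
        _ = 62 ^ l * 62 := by ring
    by_cases hm : v % 62 + 1 < 62
    · -- no carry
      have hmod : (v + 1) % 62 = v % 62 + 1 := by omega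
      have hdiv' : (v + 1) / 62 = v / 62 := by omega
      have hlt : v + 1 < 62 ^ (l + 1) := by
        have : v % 62 + 62 * (v / 62) = v := Nat.mod_add_div v 62
        have h1 : v / 62 ≤ 62 ^ l - 1 := by omega
        have h2 : 62 ^ (l + 1) = 62 * 62 ^ l := by ring
        omega
      simp only [pvIdigits, pvIncRev, hm, if_pos hlt, hmod, hdiv', if_true]
    · -- carry: v % 62 = 61
      have hm61 : v % 62 = 61 := by omega
      have hmod : (v + 1) % 62 = 0 := by omega
      have hdiv' : (v + 1) / 62 = v / 62 + 1 := by omega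
      have key : v + 1 < 62 ^ (l + 1) ↔ v / 62 + 1 < 62 ^ l := by
        have : v % 62 + 62 * (v / 62) = v := Nat.mod_add_div v 62
        have h2 : 62 ^ (l + 1) = 62 * 62 ^ l := by ring
        omega
      rw [pvIdigits]
      simp only [pvIncRev, hm, if_false]
      rw [ih (v / 62) hdiv]
      by_cases hc : v / 62 + 1 < 62 ^ l
      · simp only [if_pos hc, if_pos (key.mpr hc), Option.map_some, pvIdigits, hmod, hdiv']
      · simp only [if_neg hc, if_neg (fun h => hc (key.mp h)), Option.map_none]

theorem pvLoopA_eq : ∀ (prefix_ : String) (l : Nat) (r v : Nat) (acc : List String), v < 62 ^ l →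
    pvLoopA prefix_ r (pvIdigits v l) acc =
      acc ++ (List.range (min r (62 ^ l - v))).map
        (fun j => prefix_ ++ String.ofList ((pvIdigits (v + j) l).reverse.map (fun d => pvChars.getD d 'a'))) := by
  intro prefix_ l r
  induction r with
  | zero => intro v acc hv; simp [pvLoopA]
  | succ r ih =>
    intro v acc hv
    rw [pvLoopA]
    rw [pvIncRev_idigits l v hv]
    by_cases h1 : v + 1 < 62 ^ l
    · simp only [if_pos h1]
      rw [ih (v + 1) _ h1]
      have hmin : min (r + 1) (62 ^ l - v) = (min r (62 ^ l - (v + 1))) + 1 := by omega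
      rw [hmin, List.range_succ_eq_map]
      simp only [List.map_cons, List.map_map]
      simp only [List.append_assoc, List.singleton_append,
        Nat.add_zero]
      congr 1
      congr 1
      apply List.map_congr_left
      intro a _
      simp only [Function.comp_apply, Nat.succ_eq_add_one]
      have h : v + 1 + a = v + (a + 1) := by omega
      rw [h]
    · simp only [if_neg h1]
      have hmin : min (r + 1) (62 ^ l - v) = 1 := by omega
      rw [hmin]
      simp

theorem generate_combinations_with_prefix_spec : Claim_equal_generate_combinations_with_prefix := by
  intro prefix_ length count _ hpre
  unfold Spec_generate_combinations_with_prefix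
  unfold generate_combinations_with_prefix generate_combinations_with_prefix_alt
  set l := length.toNat with hl
  have hv0 : 0 < 62 ^ l := pow_pos (by norm_num : (0:Nat) < 62) l
  rw [← pvIdigits_zero l, pvLoopA_eq prefix_ l count.toNat 0 [] hv0]
  have hn : (min count ((62 : Int) ^ l)).toNat = min count.toNat (62 ^ l) := by
    have hcast : ((62 : Int) ^ l) = ((62 ^ l : Nat) : Int) := by push_cast; ring
    rw [hcast]
    omega
  rw [hn]
  simp only [Nat.sub_zero, Nat.zero_add, List.nil_append]
  apply List.map_congr_left
  intro j _
  rw [pvDigits_eq_map, List.map_reverse]
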